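-- pv_equiv track=rewrite | github.com/chris-martin/hocon-python | hocon/impl/SimpleConfigObject.py | map_equals
-- ===== SOURCE A (Python) =====
-- def map_equals(a, b):
--     """
--     :param a: Map<String, ConfigValue>
--     :param b: Map<String, ConfigValue>
--     :return: boolean
--     """
--     a_keys = a.keys()
--     b_keys = b.keys()
--
--     if a_keys != b_keys:
--         return False
--
--     for key in a_keys:
--         if a.get(key) != b.get(key):
--             return False
--
--     return True
-- ===== SOURCE B (Python) =====
-- def map_equals(a, b):
--     """
--     :param a: Map<String, ConfigValue>
--     :param b: Map<String, ConfigValue>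
--     :return: boolean
--     """
--     return a == b
-- ===== Notes on version B (the rewrite author's own statement) =====
-- stated objective: idiomatic
-- what changed: Replaces the explicit key-set guard plus per-key lookup loop with Python's built-in dict equality (a == b), a single closed-form comparison.
import Mathlib
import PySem

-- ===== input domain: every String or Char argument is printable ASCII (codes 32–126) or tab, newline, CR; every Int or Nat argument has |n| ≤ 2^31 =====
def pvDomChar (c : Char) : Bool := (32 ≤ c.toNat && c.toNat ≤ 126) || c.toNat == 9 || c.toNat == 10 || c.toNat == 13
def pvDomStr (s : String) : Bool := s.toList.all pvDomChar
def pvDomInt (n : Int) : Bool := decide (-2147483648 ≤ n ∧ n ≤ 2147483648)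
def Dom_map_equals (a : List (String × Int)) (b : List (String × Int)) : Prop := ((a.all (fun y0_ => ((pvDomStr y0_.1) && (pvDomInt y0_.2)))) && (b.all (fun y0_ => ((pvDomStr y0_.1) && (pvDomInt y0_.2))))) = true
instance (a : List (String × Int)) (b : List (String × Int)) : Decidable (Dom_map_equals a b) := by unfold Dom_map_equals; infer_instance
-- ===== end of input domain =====

-- B replaces A's key-set guard plus per-key lookup loop by Python's built-in dict equality (idiomatic one-liner).

-- ===== PORT A =====
-- a_keys != b_keys : Python dict keys views compare as SETS (order-insensitive); exact here since dict keys are distinct.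
def map_equals (a : List (String × Int)) (b : List (String × Int)) : Bool :=
  let da := PySem.Dict.ofList a
  let db := PySem.Dict.ofList b
  let a_keys := da.keys
  let b_keys := db.keys
  if !(a_keys.all (fun k => decide (k ∈ b_keys)) && b_keys.all (fun k => decide (k ∈ a_keys))) then
    false
  else
    -- for key in a_keys: if a.get(key) != b.get(key): return False
    a_keys.all (fun key => da.get? key == db.get? key)

-- ===== PORT B =====
-- a == b : Python dict equality = same number of entries and every item of a maps to the same value in b (order-insensitive).
def map_equals_alt (a : List (String × Int)) (b : List (String × Int)) : Bool :=
  let da := PySem.Dict.ofList a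
  let db := PySem.Dict.ofList b
  da.size == db.size && da.items.all (fun p => db.get? p.1 == some p.2)

-- ===== PRECONDITION & SPEC =====
def Spec_map_equals (a : List (String × Int)) (b : List (String × Int)) (out : Bool) : Prop := out = map_equals_alt a b
instance (a : List (String × Int)) (b : List (String × Int)) (out : Bool) : Decidable (Spec_map_equals a b out) := by unfold Spec_map_equals; infer_instance

-- ===== CLAIM (what is proved, stated in full; the proofs are below) =====
def Claim_equal_map_equals : Prop := ∀ (a : List (String × Int)) (b : List (String × Int)), Dom_map_equals a b → Spec_map_equals a b (map_equals a b)

-- ===== LEMMAS AND PROOFS =====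

theorem dict_equiv (d e : PySem.Dict String Int)
    (hd : d.keys.Nodup) (he : e.keys.Nodup) :
    ((d.keys.all (fun k => decide (k ∈ e.keys)) && e.keys.all (fun k => decide (k ∈ d.keys)))
      && d.keys.all (fun key => d.get? key == e.get? key))
    = (d.size == e.size && d.items.all (fun p => e.get? p.1 == some p.2)) := by
  have lk : d.keys.length = d.size := by simp [PySem.Dict.keys, PySem.Dict.size]
  have le : e.keys.length = e.size := by simp [PySem.Dict.keys, PySem.Dict.size]
  rw [Bool.eq_iff_iff]
  simp only [Bool.and_eq_true, List.all_eq_true, decide_eq_true_eq, beq_iff_eq]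
  constructor
  · rintro ⟨⟨hab, hba⟩, hval⟩
    refine ⟨?_, ?_⟩
    · have h1 := (List.subperm_of_subset hd (fun x hx => hab x hx)).length_le
      have h2 := (List.subperm_of_subset he (fun x hx => hba x hx)).length_le
      omega
    · intro p hp
      have hk : p.1 ∈ d.keys := PySem.Dict.mem_keys_of_mem_items d hp
      have hv : d.get? p.1 = some p.2 := PySem.Dict.get?_of_mem_items d (show (p.1, p.2) ∈ d.items from hp) hd
      rw [← hval p.1 hk]; exact hv
  · rintro ⟨hsize, hitems⟩
    have hsub : ∀ k ∈ d.keys, k ∈ e.keys := by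
      intro k hk
      simp only [PySem.Dict.keys, List.mem_map] at hk
      obtain ⟨p, hp, hpk⟩ := hk
      have := hitems p hp
      by_contra hkn
      rw [← PySem.Dict.get?_eq_none_iff_not_mem_keys] at hkn
      rw [hpk] at this
      rw [hkn] at this
      simp at this
    have hperm : d.keys.Perm e.keys := by
      refine (List.subperm_of_subset hd hsub).perm_of_length_le ?_
      omega
    have hval : ∀ k ∈ d.keys, d.get? k = e.get? k := by
      intro k hk
      have hk' := hk
      simp only [PySem.Dict.keys, List.mem_map] at hk'
      obtain ⟨p, hp, hpk⟩ := hk'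
      have h1 : d.get? k = some p.2 := by rw [← hpk]; exact PySem.Dict.get?_of_mem_items d (show (p.1, p.2) ∈ d.items from hp) hd
      have h2 : e.get? k = some p.2 := by rw [← hpk]; exact hitems p hp
      rw [h1, h2]
    exact ⟨⟨hsub, fun k hk => hperm.mem_iff.mpr hk⟩, hval⟩

-- ===== VERDICT (by name: the statement is the Claim_ definition above) =====
theorem map_equals_spec : Claim_equal_map_equals := by
  intro a b _
  unfold Spec_map_equals map_equals map_equals_alt
  simp only []
  have h := dict_equiv (PySem.Dict.ofList a) (PySem.Dict.ofList b)
    (PySem.Dict.nodup_keys_ofList a) (PySem.Dict.nodup_keys_ofList b)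
  rw [← h]
  cases ((PySem.Dict.ofList a).keys.all (fun k => decide (k ∈ (PySem.Dict.ofList b).keys)) &&
      (PySem.Dict.ofList b).keys.all (fun k => decide (k ∈ (PySem.Dict.ofList a).keys))) <;> simp
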